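-- pv_equiv track=rewrite | github.com/choiwonho/wonos-python | programmers/programmers_17681.py | solution
-- ===== SOURCE A (Python) =====
-- from collections import deque
--
-- def solution(n, arr1, arr2):
--     answer = []
--
--     for i in range(n):
--         result = ""
--         bin_arr1 = deque(format(arr1[i], 'b'))
--         bin_arr2 = deque(format(arr2[i], 'b'))
--
--         if len(bin_arr1) < n:
--             for j in range(n - len(bin_arr1)):
--                 bin_arr1.appendleft("0")
--         if len(bin_arr2) < n:
--             for j in range(n - len(bin_arr2)):
--                 bin_arr2.appendleft("0")
--
--         for a, b in zip(bin_arr1, bin_arr2):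
--
--             if a == '1' or b == '1':
--                 result += "#"
--             elif a == '0' and b == "0":
--                 result += " "
--
--         answer.append(result)
--     return answer
-- ===== SOURCE B (Python) =====
-- def solution(n, arr1, arr2):
--     return [''.join('#' if c == '1' else ' '
--                     for c in format(arr1[i] | arr2[i], 'b').zfill(n))
--             for i in range(n)]
-- ===== Notes on version B (the rewrite author's own statement) =====
-- stated objective: simpler
-- what changed: Each row is computed as one bitwise OR of the two integers, formatted with zfill(n) and mapped charwise, replacing A's two hand-padded digit deques and the zipped pair-by-pair branch loop; Pre_ excludes n > len(arr) (A raises IndexError) and rows with an entry outside [0, 2^n) -- outside the puzzle's stated bounds, where A's zip truncation and silent skipping of sign characters are implementation accidents.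
-- outside the precondition, e.g. on solution(1, [2], [1]): A returns ['#'], B returns ['##']; on solution(1, [-1], [0]): A returns [''], B returns [' #']
import Mathlib
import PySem

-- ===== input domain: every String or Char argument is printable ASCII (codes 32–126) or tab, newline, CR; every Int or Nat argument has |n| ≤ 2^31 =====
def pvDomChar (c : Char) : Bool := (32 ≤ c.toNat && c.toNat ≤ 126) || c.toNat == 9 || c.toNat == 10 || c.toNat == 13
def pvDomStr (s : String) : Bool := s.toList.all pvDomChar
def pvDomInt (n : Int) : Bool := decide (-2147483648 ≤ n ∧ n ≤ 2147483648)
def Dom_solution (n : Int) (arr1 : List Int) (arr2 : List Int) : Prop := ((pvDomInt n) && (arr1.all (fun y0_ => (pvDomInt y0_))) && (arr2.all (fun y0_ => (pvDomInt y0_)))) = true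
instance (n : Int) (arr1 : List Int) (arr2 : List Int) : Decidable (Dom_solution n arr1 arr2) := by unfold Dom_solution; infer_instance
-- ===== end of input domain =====

-- B computes each row as one bitwise OR of the two integers, formatted with zfill(n) and
-- mapped charwise, instead of A's two hand-padded digit deques zipped with a branching
-- character loop (objective: simpler).

-- ===== PORT A =====
def solution (n : Int) (arr1 : List Int) (arr2 : List Int) : List String :=
  (PySem.List.pyRange 0 n 1).foldl (fun answer i =>
    let bin1 := (PySem.Int.toBin (PySem.List.pyGetD arr1 i 0)).toList
    let bin2 := (PySem.Int.toBin (PySem.List.pyGetD arr2 i 0)).toList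
    let bin1 := if (bin1.length : Int) < n then
        (PySem.List.pyRange 0 (n - bin1.length) 1).foldl (fun d _ => '0' :: d) bin1
      else bin1
    let bin2 := if (bin2.length : Int) < n then
        (PySem.List.pyRange 0 (n - bin2.length) 1).foldl (fun d _ => '0' :: d) bin2
      else bin2
    let result := (bin1.zip bin2).foldl (fun (r : String) ab =>
        if ab.1 = '1' ∨ ab.2 = '1' then r ++ "#"
        else if ab.1 = '0' ∧ ab.2 = '0' then r ++ " " else r) ""
    answer ++ [result]) []

-- ===== PORT B =====
def solution_alt (n : Int) (arr1 : List Int) (arr2 : List Int) : List String :=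
  (PySem.List.pyRange 0 n 1).map (fun i =>
    PySem.Str.join ""
      ((PySem.Str.zfill
          (PySem.Int.toBin (PySem.Int.bor (PySem.List.pyGetD arr1 i 0) (PySem.List.pyGetD arr2 i 0)))
          n).toList.map
        (fun c => if c = '1' then "#" else " ")))

-- ===== PRECONDITION & SPEC =====
-- Pre_ excludes (a) n greater than the length of arr1 or arr2, where A raises IndexError,
-- and (b) inputs with an entry outside [0, 2^n) among the first n entries: these are outside
-- the puzzle's stated bounds, and there A's zip truncation (for values ≥ 2^n) and its silent
-- skipping of '-' characters (for negative values) are accidents of its implementation.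
def Pre_solution (n : Int) (arr1 : List Int) (arr2 : List Int) : Prop :=
  n ≤ (arr1.length : Int) ∧ n ≤ (arr2.length : Int) ∧
  (∀ x ∈ arr1.take n.toNat, 0 ≤ x ∧ x.toNat < 2 ^ n.toNat) ∧
  (∀ x ∈ arr2.take n.toNat, 0 ≤ x ∧ x.toNat < 2 ^ n.toNat)
instance (n : Int) (arr1 : List Int) (arr2 : List Int) : Decidable (Pre_solution n arr1 arr2) := by
  unfold Pre_solution; infer_instance
def pvWitness_solution : Int × List Int × List Int := (2, [1, 2], [2, 3])
def Spec_solution (n : Int) (arr1 : List Int) (arr2 : List Int) (out : List String) : Prop := out = solution_alt n arr1 arr2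
instance (n : Int) (arr1 : List Int) (arr2 : List Int) (out : List String) : Decidable (Spec_solution n arr1 arr2 out) := by unfold Spec_solution; infer_instance

-- ===== CLAIM (what is proved, stated in full; the proofs are below) =====
def Claim_equal_solution : Prop := ∀ (n : Int) (arr1 : List Int) (arr2 : List Int), Dom_solution n arr1 arr2 → Pre_solution n arr1 arr2 → Spec_solution n arr1 arr2 (solution n arr1 arr2)

-- ===== LEMMAS AND PROOFS =====

-- big-endian binary digit list of a natural number, as Python's format(t, 'b') produces it
def pvBitsBE (t : Nat) : List Char :=
  if _h : t < 2 then [Nat.digitChar t] else pvBitsBE (t / 2) ++ [Nat.digitChar (t % 2)]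
decreasing_by exact Nat.div_lt_self (by omega) (by omega)

-- fixed-width (width m) big-endian binary digit list
def pvFix (m : Nat) (t : Nat) : List Char :=
  match m with
  | 0 => []
  | m + 1 => pvFix m (t / 2) ++ [Nat.digitChar (t % 2)]

-- left-pad a char list with zeros to width m
def pvPadTo (m : Nat) (s : List Char) : List Char :=
  List.replicate (m - s.length) '0' ++ s

theorem pvToDigitsCore_eq (f : Nat) : ∀ (t : Nat) (acc : List Char), t < f →
    Nat.toDigitsCore 2 f t acc = pvBitsBE t ++ acc := by
  induction f with
  | zero => intro t acc h; omega
  | succ f ih =>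
    intro t acc h
    rw [Nat.toDigitsCore]
    by_cases h2 : t / 2 = 0
    · have ht : t < 2 := by omega
      simp [h2, pvBitsBE, ht, Nat.mod_eq_of_lt ht]
    · have ht : ¬ t < 2 := by omega
      simp only [h2, if_false]
      rw [ih (t / 2) _ (by omega)]
      conv_rhs => rw [pvBitsBE]
      simp [ht]

theorem pvToDigits_eq (t : Nat) : Nat.toDigits 2 t = pvBitsBE t := by
  rw [Nat.toDigits, pvToDigitsCore_eq (t + 1) t [] (by omega), List.append_nil]

theorem pvBitsBE_chars (t : Nat) : ∀ c ∈ pvBitsBE t, c = '0' ∨ c = '1' := by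
  induction t using Nat.strong_induction_on with
  | _ t ih =>
    rw [pvBitsBE]
    by_cases h : t < 2
    · simp only [h, dif_pos]
      interval_cases t <;> simp [Nat.digitChar]
    · simp only [h, dif_neg, not_false_iff, List.mem_append, List.mem_singleton]
      intro c hc
      rcases hc with hc | hc
      · exact ih (t / 2) (Nat.div_lt_self (by omega) (by omega)) c hc
      · have h01 : t % 2 = 0 ∨ t % 2 = 1 := by omega
        rcases h01 with h0 | h0 <;> simp [hc, h0, Nat.digitChar]

-- format(v, 'b') of a nonnegative integer is pvBitsBE of its natural value
theorem pvToBin_nonneg (k : Nat) : (PySem.Int.toBin (k : Int)).toList = pvBitsBE k := by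
  rw [PySem.Int.toList_toBin, PySem.Int.toBinChars]
  simp [pvToDigits_eq]

-- length of pvBitsBE is at most m when t < 2^m (m ≥ 1)
theorem pvBitsBE_len : ∀ m, 1 ≤ m → ∀ t, t < 2 ^ m → (pvBitsBE t).length ≤ m := by
  intro m
  induction m with
  | zero => omega
  | succ m ih =>
    intro _ t ht
    rw [pvBitsBE]
    by_cases h : t < 2
    · have h1 : t ≤ 1 := by omega
      simp [h1]
    · have hm : 1 ≤ m := by
        by_contra hm
        have : m = 0 := by omega
        subst this
        simp at ht
        omega
      have : t / 2 < 2 ^ m := by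
        rw [pow_succ] at ht
        omega
      simp only [h, dif_neg, not_false_iff, List.length_append, List.length_singleton]
      have := ih hm (t / 2) this
      omega

-- zfill on an unsigned digit string is the zero left-pad
theorem pvZfill_eq_padTo (s : List Char) (w : Int)
    (hs : ∀ c ∈ s, c = '0' ∨ c = '1') :
    PySem.Chars.zfill s w = pvPadTo w.toNat s := by
  rw [PySem.Chars.zfill.eq_def, pvPadTo]
  by_cases h : w ≤ (s.length : Int)
  · rw [if_pos h]
    have : w.toNat - s.length = 0 := by omega
    rw [this]
    rfl
  · rw [if_neg h]
    cases s with
    | nil => simp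
    | cons c rest =>
      have hc := hs c List.mem_cons_self
      have hns : ¬ (c = '+' ∨ c = '-') := by rcases hc with h0 | h0 <;> simp [h0]
      simp only [hns, if_false]

-- A's conditional appendleft-loop padding equals the zero left-pad
theorem pvFoldPrepend {α : Type} (l : List α) : ∀ b : List Char,
    l.foldl (fun d _ => '0' :: d) b = List.replicate l.length '0' ++ b := by
  induction l with
  | nil => intro b; simp
  | cons a l ih =>
    intro b
    simp only [List.foldl_cons, List.length_cons, ih ('0' :: b)]
    rw [List.replicate_succ']
    simp

theorem pvPad_eq (n : Int) (s : List Char) :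
    (if ((s.length : Nat) : Int) < n then
        (PySem.List.pyRange 0 (n - (s.length : Nat)) 1).foldl (fun d _ => '0' :: d) s
      else s) = pvPadTo n.toNat s := by
  simp only [pvPadTo]
  by_cases hlt : ((s.length : Nat) : Int) < n
  · rw [if_pos hlt, pvFoldPrepend, PySem.List.length_pyRange_one]
    congr 2
    omega
  · rw [if_neg hlt]
    have h0 : n.toNat - s.length = 0 := by omega
    rw [h0]
    rfl

-- the zero-padded binary string of t < 2^m is the fixed-width digit list pvFix m t
theorem pvFix_zero : ∀ m, pvFix m 0 = List.replicate m '0' := by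
  intro m
  induction m with
  | zero => rfl
  | succ m ih =>
    rw [pvFix, ih, List.replicate_succ']
    rfl

theorem pvPadTo_bits : ∀ m, 1 ≤ m → ∀ t, t < 2 ^ m → pvPadTo m (pvBitsBE t) = pvFix m t := by
  intro m
  induction m with
  | zero => omega
  | succ m ih =>
    intro _ t ht
    by_cases h : t < 2
    · rw [pvBitsBE]
      simp only [h, dif_pos]
      rw [pvPadTo]
      simp only [List.length_singleton]
      rw [pvFix]
      have ht2 : t / 2 = 0 := by omega
      have hm2 : t % 2 = t := by omega
      rw [ht2, hm2, pvFix_zero]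
      simp
    · have hm : 1 ≤ m := by
        by_contra hm
        have : m = 0 := by omega
        subst this
        simp at ht
        omega
      have hdiv : t / 2 < 2 ^ m := by
        rw [pow_succ] at ht
        omega
      have hlen : (pvBitsBE (t / 2)).length ≤ m := pvBitsBE_len m hm _ hdiv
      conv_lhs => rw [pvBitsBE]
      simp only [h, dif_neg, not_false_iff]
      rw [pvFix, ← ih hm (t / 2) hdiv]
      simp only [pvPadTo, List.length_append, List.length_singleton]
      have : m + 1 - ((pvBitsBE (t / 2)).length + 1) = m - (pvBitsBE (t / 2)).length := by omega
      rw [this, List.append_assoc]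

theorem pvFix_len (m : Nat) : ∀ t, (pvFix m t).length = m := by
  induction m with
  | zero => intro t; rfl
  | succ m ih => intro t; rw [pvFix]; simp [ih]

theorem pvFix_chars (m : Nat) : ∀ t, ∀ c ∈ pvFix m t, c = '0' ∨ c = '1' := by
  induction m with
  | zero => intro t c hc; simp [pvFix] at hc
  | succ m ih =>
    intro t c hc
    rw [pvFix] at hc
    simp only [List.mem_append, List.mem_singleton] at hc
    rcases hc with hc | hc
    · exact ih _ c hc
    · have h01 : t % 2 = 0 ∨ t % 2 = 1 := by omega
      rcases h01 with h0 | h0 <;> simp [hc, h0, Nat.digitChar]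

-- bit arithmetic of OR, one position at a time
theorem pvLorDiv (a b : Nat) : (a ||| b) / 2 = a / 2 ||| b / 2 := by
  apply Nat.eq_of_testBit_eq
  intro k
  simp [Nat.testBit_div_two]

theorem pvLorMod (a b : Nat) : (a ||| b) % 2 = a % 2 ||| b % 2 := by
  have h := Nat.testBit_lor a b 0
  simp only [Nat.testBit_zero] at h
  have ha := Nat.mod_two_eq_zero_or_one a
  have hb := Nat.mod_two_eq_zero_or_one b
  have hc := Nat.mod_two_eq_zero_or_one (a ||| b)
  rcases ha with h1 | h1 <;> rcases hb with h2 | h2 <;> rcases hc with h3 | h3 <;>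
    simp [h1, h2, h3] at h ⊢

-- the fixed-width digits of a ||| b are the digitwise OR of those of a and b
theorem pvFix_lor (m : Nat) : ∀ a b, pvFix m (a ||| b) =
    List.zipWith (fun x y => if x = '1' ∨ y = '1' then '1' else '0') (pvFix m a) (pvFix m b) := by
  induction m with
  | zero => intro a b; rfl
  | succ m ih =>
    intro a b
    rw [pvFix, pvLorDiv, pvLorMod, ih (a / 2) (b / 2)]
    conv_rhs => rw [pvFix, pvFix]
    rw [List.zipWith_append (by rw [pvFix_len, pvFix_len])]
    congr 1
    have ha := Nat.mod_two_eq_zero_or_one a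
    have hb := Nat.mod_two_eq_zero_or_one b
    rcases ha with h1 | h1 <;> rcases hb with h2 | h2 <;> rw [h1, h2] <;> rfl

-- ''.join unrolls one string at a time
theorem pvJoinEmptyCons (p : String) (ps : List String) :
    PySem.Str.join "" (p :: ps) = p ++ PySem.Str.join "" ps := by
  cases ps with
  | nil =>
    simp [PySem.Str.join, PySem.Chars.join_singleton, PySem.Chars.join_nil,
      String.ofList_toList, String.append_empty]
  | cons q rest =>
    simp [PySem.Str.join, PySem.Chars.join_cons_cons, String.ofList_append,
      String.ofList_toList]

-- A's zip-and-branch loop over two 0/1 digit strings builds B's joined map of their digitwise OR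
theorem pvRowEq : ∀ (x y : List Char), (∀ c ∈ x, c = '0' ∨ c = '1') →
    (∀ c ∈ y, c = '0' ∨ c = '1') → ∀ s : String,
    (x.zip y).foldl (fun (r : String) ab =>
        if ab.1 = '1' ∨ ab.2 = '1' then r ++ "#"
        else if ab.1 = '0' ∧ ab.2 = '0' then r ++ " " else r) s =
      s ++ PySem.Str.join ""
        ((List.zipWith (fun a b => if a = '1' ∨ b = '1' then '1' else '0') x y).map
          (fun c => if c = '1' then "#" else " ")) := by
  intro x
  induction x with
  | nil =>
    intro y _ _ s
    simp [PySem.Str.join, String.append_empty]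
  | cons a x ih =>
    intro y hy hx s
    cases y with
    | nil => simp [PySem.Str.join, String.append_empty]
    | cons b y =>
      have ha := hy a List.mem_cons_self
      have hb := hx b List.mem_cons_self
      simp only [List.zip_cons_cons, List.foldl_cons, List.zipWith_cons_cons, List.map_cons,
        pvJoinEmptyCons]
      rw [ih y (fun c hc => hy c (List.mem_cons_of_mem a hc))
        (fun c hc => hx c (List.mem_cons_of_mem b hc))]
      rw [← String.append_assoc]
      congr 1
      rcases ha with h1 | h1 <;> rcases hb with h2 | h2 <;> simp [h1, h2]

-- a foldl that appends singletons is a map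
theorem pvFoldAppendMap {α β : Type} (f : α → β) (l : List α) : ∀ acc : List β,
    l.foldl (fun acc x => acc ++ [f x]) acc = acc ++ l.map f := by
  induction l with
  | nil => intro acc; simp
  | cons a l ih => intro acc; simp [ih]

-- ===== VERDICT (by name: the statement is the Claim_ definition above) =====
theorem solution_spec : Claim_equal_solution := by
  intro n arr1 arr2 _ hpre
  obtain ⟨hl1, hl2, hb1, hb2⟩ := hpre
  unfold Spec_solution solution solution_alt
  rw [pvFoldAppendMap, List.nil_append]
  apply List.map_congr_left
  intro i hi
  rw [PySem.List.mem_pyRange_one] at hi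
  obtain ⟨hi0, hin⟩ := hi
  -- the two entries of this row, as natural numbers below 2^n
  have hiN : i.toNat < n.toNat := by omega
  have hr1 : i.toNat < arr1.length := by omega
  have hr2 : i.toNat < arr2.length := by omega
  have hg1 : PySem.List.pyGetD arr1 i 0 = arr1[i.toNat] :=
    PySem.List.pyGetD_eq_getElem arr1 0 hi0 (lt_of_lt_of_le hin hl1)
  have hg2 : PySem.List.pyGetD arr2 i 0 = arr2[i.toNat] :=
    PySem.List.pyGetD_eq_getElem arr2 0 hi0 (lt_of_lt_of_le hin hl2)
  have hm1 : arr1[i.toNat] ∈ arr1.take n.toNat := by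
    have : (arr1.take n.toNat)[i.toNat]'(by simp; omega) = arr1[i.toNat] := List.getElem_take
    rw [← this]
    exact List.getElem_mem _
  have hm2 : arr2[i.toNat] ∈ arr2.take n.toNat := by
    have : (arr2.take n.toNat)[i.toNat]'(by simp; omega) = arr2[i.toNat] := List.getElem_take
    rw [← this]
    exact List.getElem_mem _
  obtain ⟨ha0, haU'⟩ := hb1 _ hm1
  obtain ⟨hb0, hbU'⟩ := hb2 _ hm2
  set a := arr1[i.toNat] with hadef
  set b := arr2[i.toNat] with hbdef
  have hma : 1 ≤ n.toNat := by omega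
  have haN : a = (a.toNat : Int) := (Int.toNat_of_nonneg ha0).symm
  have hbN : b = (b.toNat : Int) := (Int.toNat_of_nonneg hb0).symm
  have hor : PySem.Int.bor a b = ((a.toNat ||| b.toNat : Nat) : Int) := by
    conv_lhs => rw [haN, hbN]
    exact PySem.Int.bor_natCast _ _
  have htA : (PySem.Int.toBin a).toList = pvBitsBE a.toNat := by
    conv_lhs => rw [haN]
    exact pvToBin_nonneg a.toNat
  have htB : (PySem.Int.toBin b).toList = pvBitsBE b.toNat := by
    conv_lhs => rw [hbN]
    exact pvToBin_nonneg b.toNat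
  -- rewrite both rows to pvFix n.toNat digit lists
  rw [hg1, hg2, hor, htA, htB]
  rw [pvPad_eq n (pvBitsBE a.toNat), pvPad_eq n (pvBitsBE b.toNat)]
  rw [PySem.Str.toList_zfill, pvToBin_nonneg,
    pvZfill_eq_padTo _ n (pvBitsBE_chars _)]
  rw [pvPadTo_bits n.toNat hma a.toNat haU', pvPadTo_bits n.toNat hma b.toNat hbU',
    pvPadTo_bits n.toNat hma (a.toNat ||| b.toNat) (Nat.bitwise_lt_two_pow haU' hbU')]
  rw [pvRowEq _ _ (pvFix_chars _ _) (pvFix_chars _ _) "", pvFix_lor]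
  rw [show ("" : String) = String.ofList [] from rfl]
  rw [← String.ofList_toList (s := PySem.Str.join _ _), ← String.ofList_append]
  simp
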